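-- pv_equiv track=rewrite | github.com/TDevViper/Astra_Presonal_ai | backend/websearch/search.py | format_results_for_llm
-- ===== SOURCE A (Python) =====
-- def format_results_for_llm(results: list, max_chars: int = 2000) -> str:
--     """Format search results into clean context for LLM."""
--     if not results:
--         return "No search results found."
--     formatted   = "SEARCH RESULTS:\n"
--     total_chars = 0
--     for i, r in enumerate(results, 1):
--         entry = f"\n[{i}] {r.get('title','').strip()}\n{r.get('snippet','').strip()}\nSource: {r.get('source','').strip()}\n"
--         if total_chars + len(entry) > max_chars:
--             break
--         formatted   += entry
--         total_chars += len(entry)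
--     return formatted
-- ===== SOURCE B (Python) =====
-- def format_results_for_llm(results: list, max_chars: int = 2000) -> str:
--     """Format search results into clean context for LLM (prefix-sum decomposition)."""
--     if not results:
--         return "No search results found."
--     entries = [
--         "\n[{}] {}\n{}\nSource: {}\n".format(
--             i,
--             r.get('title', '').strip(),
--             r.get('snippet', '').strip(),
--             r.get('source', '').strip(),
--         )
--         for i, r in enumerate(results, 1)
--     ]
--     running, sums = 0, []
--     for e in entries:
--         running += len(e)
--         sums.append(running)
--     cutoff = sum(1 for s in sums if s <= max_chars)
--     return "SEARCH RESULTS:\n" + "".join(entries[:cutoff])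
-- ===== Notes on version B (the rewrite author's own statement) =====
-- stated objective: alternative
-- what changed: A interleaves formatting with a running total and breaks out of the loop at the first overflow while concatenating onto the result string; B first builds the full list of formatted entries, computes their length prefix sums, counts how many prefix sums fit within max_chars, and joins exactly that prefix onto the header.
import Mathlib
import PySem

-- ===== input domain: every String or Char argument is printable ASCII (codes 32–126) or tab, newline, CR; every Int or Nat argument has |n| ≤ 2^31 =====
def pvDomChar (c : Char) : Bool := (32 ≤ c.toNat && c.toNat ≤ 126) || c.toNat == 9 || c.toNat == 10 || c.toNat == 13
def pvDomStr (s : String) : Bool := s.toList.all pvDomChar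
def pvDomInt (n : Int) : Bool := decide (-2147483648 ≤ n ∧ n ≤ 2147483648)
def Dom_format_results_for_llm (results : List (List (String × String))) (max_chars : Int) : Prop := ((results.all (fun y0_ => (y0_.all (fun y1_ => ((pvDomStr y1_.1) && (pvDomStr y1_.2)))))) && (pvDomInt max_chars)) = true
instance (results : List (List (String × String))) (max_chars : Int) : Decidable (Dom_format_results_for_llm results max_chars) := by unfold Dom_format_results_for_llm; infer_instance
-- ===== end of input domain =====

-- B replaces A's accumulate-and-break loop by a different decomposition (format all entries,
-- prefix sums, count the sums that fit, join the kept prefix); same return value, same cost class.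

-- the entry f-string shared verbatim by both Pythons
def pvEntry (i : Int) (r : List (String × String)) : String :=
  "\n[" ++ PySem.Int.toStr i ++ "] " ++ PySem.Str.strip ((PySem.Dict.mk r).getD "title" "")
    ++ "\n" ++ PySem.Str.strip ((PySem.Dict.mk r).getD "snippet" "")
    ++ "\nSource: " ++ PySem.Str.strip ((PySem.Dict.mk r).getD "source" "") ++ "\n"

-- ===== PORT A =====
-- A's for-loop with the early break: state = (formatted, total_chars), index i from enumerate(results, 1)
def pvALoop (max_chars : Int) : List (List (String × String)) → Int → String → Int → String
  | [], _, formatted, _ => formatted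
  | r :: rest, i, formatted, total =>
    let entry := pvEntry i r
    if total + PySem.Str.len entry > max_chars then formatted
    else pvALoop max_chars rest (i + 1) (formatted ++ entry) (total + PySem.Str.len entry)

def format_results_for_llm (results : List (List (String × String))) (max_chars : Int) : String :=
  if results = [] then "No search results found."
  else pvALoop max_chars results 1 "SEARCH RESULTS:\n" 0

-- ===== PORT B =====
-- the entries list-comprehension of Source B
def pvEntries : List (List (String × String)) → Int → List String
  | [], _ => []
  | r :: rest, i => pvEntry i r :: pvEntries rest (i + 1)

-- Source B's running prefix-sum loop
def pvPrefixSums : List String → Int → List Int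
  | [], _ => []
  | e :: rest, running => (running + PySem.Str.len e) :: pvPrefixSums rest (running + PySem.Str.len e)

def format_results_for_llm_alt (results : List (List (String × String))) (max_chars : Int) : String :=
  if results = [] then "No search results found."
  else
    let entries := pvEntries results 1
    let sums := pvPrefixSums entries 0
    -- cutoff = sum(1 for s in sums if s <= max_chars); entries[:cutoff] with cutoff ≥ 0 is List.take
    let cutoff := sums.countP (fun s => decide (s ≤ max_chars))
    "SEARCH RESULTS:\n" ++ PySem.Str.join "" (entries.take cutoff)

-- ===== PRECONDITION & SPEC =====
def Spec_format_results_for_llm (results : List (List (String × String))) (max_chars : Int) (out : String) : Prop := out = format_results_for_llm_alt results max_chars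
instance (results : List (List (String × String))) (max_chars : Int) (out : String) : Decidable (Spec_format_results_for_llm results max_chars out) := by unfold Spec_format_results_for_llm; infer_instance

-- ===== CLAIM (what is proved, stated in full; the proofs are below) =====
def Claim_equal_format_results_for_llm : Prop := ∀ (results : List (List (String × String))) (max_chars : Int), Dom_format_results_for_llm results max_chars → Spec_format_results_for_llm results max_chars (format_results_for_llm results max_chars)

-- ===== LEMMAS AND PROOFS =====
lemma pvLen_nonneg (e : String) : 0 ≤ PySem.Str.len e := by
  simp [PySem.Str.len_eq]

lemma pvChars_join_empty_cons (cs : List Char) (l : List (List Char)) :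
    PySem.Chars.join [] (cs :: l) = cs ++ PySem.Chars.join [] l := by
  cases l with
  | nil => simp [PySem.Chars.join_singleton]
  | cons b t => rw [PySem.Chars.join_cons_cons]; simp

lemma pvJoin_empty_cons (x : String) (l : List String) :
    PySem.Str.join "" (x :: l) = x ++ PySem.Str.join "" l := by
  simp only [PySem.Str.join, String.toList_empty, List.map_cons]
  rw [pvChars_join_empty_cons, String.ofList_append, String.ofList_toList]

lemma pvPrefixSums_ge (es : List String) (t : Int) : ∀ x ∈ pvPrefixSums es t, t ≤ x := by
  induction es generalizing t with
  | nil => simp [pvPrefixSums]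
  | cons e rest ih =>
    intro x hx
    have hl := pvLen_nonneg e
    simp only [pvPrefixSums, List.mem_cons] at hx
    rcases hx with h | h
    · omega
    · have := ih (t + PySem.Str.len e) x h; omega

lemma pvLoop_eq (max_chars : Int) (rs : List (List (String × String))) :
    ∀ (i : Int) (acc : String) (t : Int),
      pvALoop max_chars rs i acc t =
        acc ++ PySem.Str.join ""
          ((pvEntries rs i).take
            ((pvPrefixSums (pvEntries rs i) t).countP (fun s => decide (s ≤ max_chars)))) := by
  induction rs with
  | nil => intro i acc t; simp [pvALoop, pvEntries, pvPrefixSums, PySem.Str.join, String.append_empty]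
  | cons r rest ih =>
    intro i acc t
    simp only [pvALoop, pvEntries, pvPrefixSums, List.countP_cons]
    by_cases h : t + PySem.Str.len (pvEntry i r) > max_chars
    · rw [if_pos h]
      have hz : (pvPrefixSums (pvEntries rest (i + 1)) (t + PySem.Str.len (pvEntry i r))).countP
          (fun s => decide (s ≤ max_chars)) = 0 := by
        rw [List.countP_eq_zero]
        intro x hx
        have := pvPrefixSums_ge _ _ x hx
        simp only [decide_eq_true_eq]
        omega
      rw [hz]
      simp only [decide_eq_true_eq]
      rw [if_neg (by omega)]
      simp [PySem.Str.join, String.append_empty]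
    · rw [if_neg h]
      rw [ih (i + 1) (acc ++ pvEntry i r) (t + PySem.Str.len (pvEntry i r))]
      simp only [decide_eq_true_eq]
      rw [if_pos (by omega)]
      rw [List.take_succ_cons, pvJoin_empty_cons, String.append_assoc]

-- ===== VERDICT (by name: the statement is the Claim_ definition above) =====
theorem format_results_for_llm_spec : Claim_equal_format_results_for_llm := by
  intro results max_chars _
  unfold Spec_format_results_for_llm format_results_for_llm format_results_for_llm_alt
  by_cases h : results = []
  · rw [if_pos h, if_pos h]
  · rw [if_neg h, if_neg h]
    exact pvLoop_eq max_chars results 1 "SEARCH RESULTS:\n" 0
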